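-- pv_equiv track=rewrite | github.com/MarouaneBenabdelkader/bitpacking | src/bitpacking/overflow.py | _compress_noncrossing
-- ===== SOURCE A (Python) =====
-- def _compress_noncrossing(values: list[int], k: int) -> list[int]:
--     """Compress values using non-crossing method."""
--     if k > 32:
--         raise ValueError(f"Bit width {k} exceeds 32-bit limit")
--
--     capacity = 32 // k
--     if capacity == 0:
--         raise ValueError(f"Bit width {k} too large for 32-bit words")
--
--     num_words = (len(values) + capacity - 1) // capacity
--     words = [0] * num_words
--     mask = (1 << k) - 1
--
--     for i, value in enumerate(values):
--         word_idx = i // capacity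
--         slot = i % capacity
--         bit_offset = slot * k
--         words[word_idx] |= (value & mask) << bit_offset
--
--     return words
-- ===== SOURCE B (Python) =====
-- def _compress_noncrossing(values: list[int], k: int) -> list[int]:
--     """Compress values using non-crossing method (chunked re-implementation)."""
--     if k > 32:
--         raise ValueError(f"Bit width {k} exceeds 32-bit limit")
--
--     capacity = 32 // k
--     if capacity == 0:
--         raise ValueError(f"Bit width {k} too large for 32-bit words")
--
--     mask = (1 << k) - 1
--     words = []
--     for start in range(0, len(values), capacity):
--         chunk = values[start:start + capacity]
--         word = 0
--         for slot, value in enumerate(chunk):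
--             word |= (value & mask) << (slot * k)
--         words.append(word)
--     return words
-- ===== Notes on version B (the rewrite author's own statement) =====
-- stated objective: alternative
-- what changed: Instead of one flat loop computing word_idx=i//capacity and slot=i%capacity per element and |=-ing into a preallocated word array, B partitions values into consecutive slices of length capacity and builds each output word by folding over the enumerated chunk, appending one word per chunk.
import Mathlib
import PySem

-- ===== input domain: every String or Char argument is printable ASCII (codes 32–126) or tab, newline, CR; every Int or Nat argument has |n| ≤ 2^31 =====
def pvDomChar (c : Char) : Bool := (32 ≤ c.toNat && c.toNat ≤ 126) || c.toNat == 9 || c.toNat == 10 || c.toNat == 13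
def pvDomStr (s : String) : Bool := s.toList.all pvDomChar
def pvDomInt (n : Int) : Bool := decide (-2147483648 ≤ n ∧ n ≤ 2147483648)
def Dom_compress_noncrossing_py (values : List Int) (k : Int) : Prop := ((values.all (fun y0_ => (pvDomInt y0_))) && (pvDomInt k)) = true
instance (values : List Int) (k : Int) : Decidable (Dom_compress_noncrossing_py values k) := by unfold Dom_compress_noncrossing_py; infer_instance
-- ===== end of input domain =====

-- B replaces A's flat indexed loop (word_idx = i // capacity, slot = i % capacity into a
-- preallocated word array) by explicit chunking: values are split into consecutive slices of
-- length capacity and each output word is folded up from its own chunk (objective: alternative).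


-- ===== PORT A =====
-- A's loop `for i, value in enumerate(values): words[i//capacity] |= (value & mask) << ((i%capacity)*k)`
-- as structural recursion over the remaining values with the running index i.
-- (Inside Pre_ the index i//capacity is always in range, so getD/set are exact for words[...] |= ....)
def pvALoop (cap k mask : Int) : Int → List Int → List Int → List Int
  | _, [], words => words
  | i, v :: rest, words =>
      let wi := (PySem.Int.floordiv i cap).toNat
      let w' := words.set wi (PySem.Int.bor (words.getD wi 0) ((PySem.Int.band v mask) <<< (PySem.Int.mod i cap * k).toNat))
      pvALoop cap k mask (i + 1) rest w'

def compress_noncrossing_py (values : List Int) (k : Int) : List Int :=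
  if 32 < k then [] else  -- Python: raise ValueError (excluded by Pre_)
  let capacity := PySem.Int.floordiv 32 k  -- k = 0 raises ZeroDivisionError (excluded by Pre_)
  if capacity = 0 then [] else  -- Python: raise ValueError (excluded by Pre_)
  let num_words := PySem.Int.floordiv ((values.length : Int) + capacity - 1) capacity
  let words := List.replicate num_words.toNat 0
  let mask := ((1 : Int) <<< k.toNat) - 1  -- 1 << k; k < 0 raises ValueError (excluded by Pre_)
  pvALoop capacity k mask 0 values words

-- ===== PORT B =====
-- `word |= (value & mask) << (slot * k)` over the enumerated chunk, carrying (word, slot).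
def pvPackStep (mask k : Int) (acc : Int × Int) (v : Int) : Int × Int :=
  (PySem.Int.bor acc.1 ((PySem.Int.band v mask) <<< (acc.2 * k).toNat), acc.2 + 1)

def pvPackWord (mask k : Int) (chunk : List Int) : Int :=
  (chunk.foldl (pvPackStep mask k) (0, 0)).1

-- the outer loop over slices values[start:start+capacity]; for cap ≥ 1 (guaranteed inside Pre_)
-- take cap (v :: rest) = v :: rest.take (cap-1) and drop cap (v :: rest) = rest.drop (cap-1).
def pvPackChunks (mask k : Int) (cap : Nat) : List Int → List Int
  | [] => []
  | v :: rest =>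
      pvPackWord mask k (v :: rest.take (cap - 1)) :: pvPackChunks mask k cap (rest.drop (cap - 1))
termination_by vs => vs.length
decreasing_by simp

def compress_noncrossing_py_alt (values : List Int) (k : Int) : List Int :=
  if 32 < k then [] else
  let capacity := PySem.Int.floordiv 32 k
  if capacity = 0 then [] else
  let mask := ((1 : Int) <<< k.toNat) - 1
  pvPackChunks mask k capacity.toNat values

-- ===== PRECONDITION & SPEC =====
-- Pre_ excludes exactly the inputs where Python A raises: k > 32 and capacity == 0 (explicit
-- ValueError), k = 0 (ZeroDivisionError in 32 // k), and k < 0 (ValueError in 1 << k).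
def Pre_compress_noncrossing_py (values : List Int) (k : Int) : Prop := 1 ≤ k ∧ k ≤ 32
instance (values : List Int) (k : Int) : Decidable (Pre_compress_noncrossing_py values k) := by
  unfold Pre_compress_noncrossing_py; infer_instance

def pvWitness_compress_noncrossing_py : List Int × Int := ([3, -1, 7, 1000], 5)

def Spec_compress_noncrossing_py (values : List Int) (k : Int) (out : List Int) : Prop := out = compress_noncrossing_py_alt values k
instance (values : List Int) (k : Int) (out : List Int) : Decidable (Spec_compress_noncrossing_py values k out) := by unfold Spec_compress_noncrossing_py; infer_instance

-- ===== CLAIM (what is proved, stated in full; the proofs are below) =====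
def Claim_equal_compress_noncrossing_py : Prop := ∀ (values : List Int) (k : Int), Dom_compress_noncrossing_py values k → Pre_compress_noncrossing_py values k → Spec_compress_noncrossing_py values k (compress_noncrossing_py values k)

-- ===== LEMMAS AND PROOFS =====

-- splitting A's loop over an appended list
lemma pvALoop_append (cap k mask : Int) (xs : List Int) :
    ∀ (ys : List Int) (i : Int) (w : List Int),
    pvALoop cap k mask i (xs ++ ys) w
      = pvALoop cap k mask (i + xs.length) ys (pvALoop cap k mask i xs w) := by
  induction xs with
  | nil => intro ys i w; simp [pvALoop]
  | cons v rest ih =>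
      intro ys i w
      simp only [List.cons_append, pvALoop, ih, List.length_cons]
      congr 1
      push_cast; ring

-- within one word: while i + |chunk| ≤ c, A only touches the head word, and the update it
-- performs is exactly B's pvPackStep fold starting at slot i.
lemma pvALoop_chunk (k mask : Int) (c : Nat) (hc : 0 < c) :
    ∀ (chunk : List Int) (i : Nat) (w : Int) (rest : List Int), i + chunk.length ≤ c →
    pvALoop (c : Int) k mask (i : Int) chunk (w :: rest)
      = (chunk.foldl (pvPackStep mask k) (w, (i : Int))).1 :: rest := by
  intro chunk
  induction chunk with
  | nil => intro i w rest _; simp [pvALoop]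
  | cons v tl ih =>
      intro i w rest hle
      have hi : i < c := by simp at hle; omega
      have hdiv : PySem.Int.floordiv (i : Int) (c : Int) = ((i / c : Nat) : Int) :=
        PySem.Int.floordiv_natCast i c
      have hmod : PySem.Int.mod (i : Int) (c : Int) = ((i % c : Nat) : Int) :=
        PySem.Int.mod_natCast i c
      have hd0 : i / c = 0 := Nat.div_eq_of_lt hi
      have hm : i % c = i := Nat.mod_eq_of_lt hi
      simp only [pvALoop, hdiv, hmod, hd0, hm, Nat.cast_zero, Int.toNat_zero,
        List.getD_cons_zero, List.set_cons_zero, List.foldl_cons]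
      have := ih (i + 1) (PySem.Int.bor w ((PySem.Int.band v mask) <<< (((i : Int)) * k).toNat)) rest
        (by simp at hle ⊢; omega)
      push_cast at this ⊢
      rw [this]
      rfl

-- shifting past one full word: starting the index at c + i on state (w :: rest) leaves w
-- untouched and acts like starting at i on rest.
lemma pvALoop_shift (k mask : Int) (c : Nat) (hc : 0 < c) :
    ∀ (vs : List Int) (i : Nat) (w : Int) (rest : List Int),
    pvALoop (c : Int) k mask ((c + i : Nat) : Int) vs (w :: rest)
      = w :: pvALoop (c : Int) k mask (i : Int) vs rest := by
  intro vs
  induction vs with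
  | nil => intro i w rest; simp [pvALoop]
  | cons v tl ih =>
      intro i w rest
      have hdiv : (c + i) / c = 1 + i / c := by
        rw [Nat.add_comm c i, Nat.add_div_right _ hc]; omega
      have hmod : (c + i) % c = i % c := by
        rw [Nat.add_comm c i, Nat.add_mod_right]
      simp only [pvALoop, PySem.Int.floordiv_natCast, PySem.Int.mod_natCast, hdiv, hmod,
        Int.toNat_natCast]
      rw [show (1 + i / c) = (i / c) + 1 by omega]
      simp only [List.getD_cons_succ, List.set_cons_succ]
      have := ih (i + 1) w (rest.set (i / c)
        (PySem.Int.bor (rest.getD (i / c) 0) ((PySem.Int.band v mask) <<< (((i % c : Nat) : Int) * k).toNat)))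
      push_cast at this ⊢
      rw [show ((c : Int) + i) + 1 = (c : Int) + ((i : Int) + 1) by ring, this]

-- main loop equivalence: A's flat loop on the zero-filled word array equals B's chunking.
lemma pvMain (k mask : Int) (c : Nat) (hc : 0 < c) :
    ∀ (n : Nat) (vs : List Int), vs.length ≤ n →
    pvALoop (c : Int) k mask 0 vs (List.replicate ((vs.length + c - 1) / c) 0)
      = pvPackChunks mask k c vs := by
  intro n
  induction n with
  | zero =>
      intro vs h
      have : vs = [] := List.eq_nil_of_length_eq_zero (by omega)
      subst this
      simp [pvALoop, pvPackChunks, Nat.div_eq_of_lt (by omega : c - 1 < c)]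
  | succ n ih =>
      intro vs h
      match vs with
      | [] => simp [pvALoop, pvPackChunks, Nat.div_eq_of_lt (by omega : c - 1 < c)]
      | v :: rest =>
        set l := (v :: rest).length with hl
        have hl1 : 1 ≤ l := by simp [hl]
        have hN : (l + c - 1) / c = ((l - 1) / c) + 1 := by
          rw [show l + c - 1 = (l - 1) + 1 * c by omega, Nat.add_mul_div_right _ _ hc]
        have hsplit : v :: rest = (v :: rest).take c ++ (v :: rest).drop c := by
          simp
        rw [hN, List.replicate_succ]
        conv_lhs => rw [hsplit]
        rw [pvALoop_append]
        have htlen : ((v :: rest).take c).length = min c l := by simp [hl]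
        have hchunk := pvALoop_chunk k mask c hc ((v :: rest).take c) 0 0
          (List.replicate ((l - 1) / c) 0) (by simp [htlen])
        norm_num at hchunk
        rw [zero_add, hchunk]
        by_cases hcase : l ≤ c
        · -- single (possibly partial) chunk: the tail is empty
          have hdrop : (v :: rest).drop c = [] := by
            apply List.drop_eq_nil_of_le; omega
          have hN0 : (l - 1) / c = 0 := Nat.div_eq_of_lt (by omega)
          have htake : (v :: rest).take c = v :: rest.take (c - 1) := by
            cases c with
            | zero => omega
            | succ m => simp
          rw [hdrop, hN0]
          simp only [List.replicate_zero, pvALoop]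
          rw [show pvPackChunks mask k c (v :: rest) =
            pvPackWord mask k (v :: rest.take (c - 1)) :: pvPackChunks mask k c (rest.drop (c - 1))
            from by rw [pvPackChunks]]
          have hdrop' : rest.drop (c - 1) = [] := by
            apply List.drop_eq_nil_of_le; simp [hl] at hcase; omega
          rw [hdrop', ← htake]
          simp [pvPackChunks, pvPackWord]
        · -- a full first chunk followed by the remaining chunks
          rw [Nat.not_le] at hcase
          have htlen' : ((v :: rest).take c).length = c := by omega
          rw [htlen']
          have hshift := pvALoop_shift k mask c hc
            (((v :: rest).drop c)) 0 ((List.take c (v :: rest)).foldl (pvPackStep mask k) (0, 0)).1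
            (List.replicate ((l - 1) / c) 0)
          norm_num at hshift
          rw [hshift]
          have hdlen : ((v :: rest).drop c).length = l - c := by simp [hl]
          have hNd : (((v :: rest).drop c).length + c - 1) / c = (l - 1) / c := by
            rw [hdlen, show l - c + c - 1 = l - 1 by omega]
          have := ih ((v :: rest).drop c) (by rw [hdlen]; omega)
          rw [hNd] at this
          rw [this]
          rw [show pvPackChunks mask k c (v :: rest) =
            pvPackWord mask k (v :: rest.take (c - 1)) :: pvPackChunks mask k c (rest.drop (c - 1))
            from by rw [pvPackChunks]]
          have htake : (v :: rest).take c = v :: rest.take (c - 1) := by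
            cases c with
            | zero => omega
            | succ m => simp
          have hdropeq : (v :: rest).drop c = rest.drop (c - 1) := by
            cases c with
            | zero => omega
            | succ m => simp
          rw [htake, hdropeq, pvPackWord]

-- ===== VERDICT (by name: the statement is the Claim_ definition above) =====
theorem compress_noncrossing_py_spec : Claim_equal_compress_noncrossing_py := by
  intro values k _ hpre
  obtain ⟨hk1, hk32⟩ := hpre
  have hk0 : 0 < k := by omega
  have hng : ¬ 32 < k := by omega
  have hcap1 : 1 ≤ PySem.Int.floordiv 32 k := by
    rw [PySem.Int.le_floordiv_iff_mul_le hk0]; omega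
  set capacity := PySem.Int.floordiv 32 k with hcapdef
  have hcapne : ¬ capacity = 0 := by omega
  set c := capacity.toNat with hcdef
  have hc : 0 < c := by omega
  have hcast : capacity = (c : Int) := by omega
  have hnum : (PySem.Int.floordiv ((values.length : Int) + capacity - 1) capacity).toNat
      = (values.length + c - 1) / c := by
    rw [hcast, show ((values.length : Int) + (c : Int) - 1) = ((values.length + c - 1 : Nat) : Int)
      by omega, PySem.Int.floordiv_natCast]
    exact Int.toNat_natCast _
  show compress_noncrossing_py values k = compress_noncrossing_py_alt values k
  unfold compress_noncrossing_py compress_noncrossing_py_alt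
  rw [if_neg hng, if_neg hng, ← hcapdef, if_neg hcapne, if_neg hcapne]
  show pvALoop capacity k ((1 : Int) <<< k.toNat - 1) 0 values
      (List.replicate (PySem.Int.floordiv ((values.length : Int) + capacity - 1) capacity).toNat 0)
    = pvPackChunks ((1 : Int) <<< k.toNat - 1) k capacity.toNat values
  rw [hnum, hcast, Int.toNat_natCast]
  exact pvMain k _ c hc values.length values le_rfl
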